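-- pv_equiv track=rewrite | github.com/denniselorm/python_projects | a as part of an String/a as part of an String/a_as_part_of_an_String.py | calculateA
-- ===== SOURCE A (Python) =====
-- def calculateA(var, n):
--     var = var.lower()
--     newVar = []
--     aCount = 0
--     i = 0
--     while i <= n-1:
--         varCount = 0
--         for j in var:
--             if len(newVar) < n:
--                 newVar.append(j)
--                 varCount += 1
--             else:
--                 break
--         i += varCount
--     for k in range(len(newVar)):
--         if newVar[k] == "a":
--             aCount += 1
--     return aCount
-- ===== SOURCE B (Python) =====
-- def calculateA(var, n):
--     if n <= 0:
--         return 0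
--     s = var.lower()
--     full, rem = divmod(n, len(s))
--     return full * s.count('a') + s[:rem].count('a')
-- ===== Notes on version B (the rewrite author's own statement) =====
-- stated objective: faster
-- what changed: replaces the character-by-character build-up of the first n characters of the repeated string with divmod arithmetic: full-repetition count times the 'a'-count of var plus the 'a'-count of the remainder prefix
import Mathlib
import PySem

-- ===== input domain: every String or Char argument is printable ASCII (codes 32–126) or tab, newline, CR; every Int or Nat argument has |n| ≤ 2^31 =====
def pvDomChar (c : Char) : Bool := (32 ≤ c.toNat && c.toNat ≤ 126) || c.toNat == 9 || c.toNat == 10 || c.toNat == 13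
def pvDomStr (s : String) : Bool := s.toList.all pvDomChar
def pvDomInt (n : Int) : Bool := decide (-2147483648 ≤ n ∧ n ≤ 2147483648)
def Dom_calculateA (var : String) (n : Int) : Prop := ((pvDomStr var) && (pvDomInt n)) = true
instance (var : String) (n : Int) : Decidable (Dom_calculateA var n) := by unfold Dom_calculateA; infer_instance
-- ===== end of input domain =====

-- B replaces A's O(n) character-by-character build-up of the first n characters of the
-- repeated string by divmod arithmetic over one scan of var (objective: faster).


-- ===== PORT A =====
-- inner 'for j in var: if len(newVar) < n: newVar.append(j); varCount += 1 else: break'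
def pvInnerA (n : Int) : List Char → List Char → Int → List Char × Int
  | [], newVar, varCount => (newVar, varCount)
  | j :: rest, newVar, varCount =>
    if (newVar.length : Int) < n then pvInnerA n rest (newVar ++ [j]) (varCount + 1)
    else (newVar, varCount)

-- 'while i <= n-1: … i += varCount', with fuel n.toNat+1 (enough whenever the Python
-- loop terminates: each executed iteration appends at least one character)
def pvWhileA (v : List Char) (n : Int) : Nat → List Char → Int → List Char
  | 0, newVar, _ => newVar
  | fuel + 1, newVar, i =>
    if i ≤ n - 1 then
      let p := pvInnerA n v newVar 0
      pvWhileA v n fuel p.1 (i + p.2)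
    else newVar

def calculateA (var : String) (n : Int) : Int :=
  let v := (PySem.Str.lower var).toList
  let newVar := pvWhileA v n (n.toNat + 1) [] 0
  -- 'for k in range(len(newVar)): if newVar[k] == "a": aCount += 1'
  newVar.foldl (fun aCount k => if k == 'a' then aCount + 1 else aCount) 0

-- ===== PORT B =====
def calculateA_alt (var : String) (n : Int) : Int :=
  if n ≤ 0 then 0
  else
    let s := PySem.Str.lower var
    -- full, rem = divmod(n, len(s)) : exact for len s ≠ 0, which Pre_ guarantees here
    let full := PySem.Int.floordiv n (PySem.Str.len s)
    let rem := PySem.Int.mod n (PySem.Str.len s)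
    full * (PySem.Str.count s "a" : Int)
      + (PySem.Str.count (PySem.Str.slice s none (some rem)) "a" : Int)

-- ===== PRECONDITION & SPEC =====
-- Pre_ excludes only var = "" with n ≥ 1, where A loops forever (never returns) and B raises ZeroDivisionError.
def Pre_calculateA (var : String) (n : Int) : Prop := n ≤ 0 ∨ var ≠ ""
instance (var : String) (n : Int) : Decidable (Pre_calculateA var n) := by
  unfold Pre_calculateA; infer_instance
def pvWitness_calculateA : String × Int := ("banana", 8)

def Spec_calculateA (var : String) (n : Int) (out : Int) : Prop := out = calculateA_alt var n
instance (var : String) (n : Int) (out : Int) : Decidable (Spec_calculateA var n out) := by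
  unfold Spec_calculateA; infer_instance

-- ===== CLAIM (what is proved, stated in full; the proofs are below) =====
def Claim_equal_calculateA : Prop := ∀ (var : String) (n : Int),
  Dom_calculateA var n → Pre_calculateA var n → Spec_calculateA var n (calculateA var n)

-- ===== LEMMAS AND PROOFS =====

-- the first R characters of v repeated forever (v ≠ []), built chunk by chunk as A's while loop does
def pvG (v : List Char) : Nat → List Char
  | R =>
    if h : R = 0 ∨ v = [] then []
    else v.take (min v.length R) ++ pvG v (R - min v.length R)
  termination_by R => R
  decreasing_by
    push_neg at h
    have hv : 0 < v.length := List.length_pos_iff.mpr h.2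
    omega

theorem pvInnerA_spec (n : Int) : ∀ (l newVar : List Char) (c : Int),
    pvInnerA n l newVar c =
      (newVar ++ l.take (min l.length (n - newVar.length).toNat),
       c + (min l.length (n - newVar.length).toNat : Nat)) := by
  intro l
  induction l with
  | nil => intro newVar c; simp [pvInnerA]
  | cons j rest ih =>
    intro newVar c
    simp only [pvInnerA]
    by_cases h : (newVar.length : Int) < n
    · rw [if_pos h, ih]
      have h1 : (n - ((newVar ++ [j]).length : Int)).toNat = (n - newVar.length).toNat - 1 := by
        simp; omega
      have h2 : min (j :: rest).length (n - newVar.length).toNat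
          = min rest.length ((n - newVar.length).toNat - 1) + 1 := by
        simp only [List.length_cons]; omega
      rw [h1, h2]
      simp only [List.take_succ_cons, Prod.mk.injEq]
      refine ⟨by simp, by push_cast; ring⟩
    · rw [if_neg h]
      have : (n - newVar.length).toNat = 0 := by omega
      simp [this]

theorem pvWhileA_spec (v : List Char) (N : Nat) (hv : v ≠ []) :
    ∀ (fuel : Nat) (newVar : List Char), newVar.length ≤ N → N - newVar.length ≤ fuel →
      pvWhileA v (N : Int) fuel newVar (newVar.length : Int)
        = newVar ++ pvG v (N - newVar.length) := by
  intro fuel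
  induction fuel with
  | zero =>
    intro newVar hle hfuel
    have : N - newVar.length = 0 := by omega
    rw [this, pvWhileA]
    rw [pvG]
    simp
  | succ fuel ih =>
    intro newVar hle hfuel
    rw [pvWhileA]
    by_cases h : (newVar.length : Int) ≤ (N : Int) - 1
    · rw [if_pos h]
      have hlen : newVar.length < N := by omega
      rw [pvInnerA_spec]
      have hcast : ((N : Int) - newVar.length).toNat = N - newVar.length := by omega
      rw [hcast]
      set t := min v.length (N - newVar.length) with ht
      have ht1 : 1 ≤ t := by
        have : 0 < v.length := List.length_pos_iff.mpr hv
        omega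
      have htake : (v.take t).length = t := by
        rw [List.length_take]; omega
      have hlen' : (newVar ++ v.take t).length = newVar.length + t := by
        simp [htake]
      have hi : (newVar.length : Int) + (0 + (t : Nat) : Int) = ((newVar ++ v.take t).length : Int) := by
        rw [hlen']; push_cast; ring
      simp only [hi]
      rw [ih (newVar ++ v.take t) (by omega) (by omega)]
      rw [List.append_assoc]
      congr 1
      have hR : N - newVar.length ≠ 0 := by omega
      conv_rhs => rw [pvG]
      rw [dif_neg (by push_neg; exact ⟨hR, hv⟩)]
      congr 2
      omega
    · rw [if_neg h]
      have : N - newVar.length = 0 := by omega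
      rw [this, pvG]
      simp

theorem pvG_count (v : List Char) (hv : v ≠ []) (c : Char) : ∀ R : Nat,
    (pvG v R).count c = (R / v.length) * v.count c + (v.take (R % v.length)).count c := by
  have hm : 0 < v.length := List.length_pos_iff.mpr hv
  intro R
  induction R using Nat.strong_induction_on with
  | _ R ih =>
    rw [pvG]
    by_cases h0 : R = 0
    · simp [h0, Nat.zero_div, Nat.zero_mod]
    · rw [dif_neg (by push_neg; exact ⟨h0, hv⟩)]
      by_cases hR : v.length ≤ R
      · have hmin : min v.length R = v.length := by omega
        rw [hmin, List.take_length, List.count_append,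
          ih (R - v.length) (by omega)]
        have hdiv : R / v.length = (R - v.length) / v.length + 1 :=
          Nat.div_eq_sub_div hm hR
        have hmod : R % v.length = (R - v.length) % v.length := by
          rw [Nat.mod_eq_sub_mod hR]
        rw [hdiv, hmod]; ring
      · have hmin : min v.length R = R := by omega
        have hdiv : R / v.length = 0 := Nat.div_eq_of_lt (by omega)
        have hmod : R % v.length = R := Nat.mod_eq_of_lt (by omega)
        rw [hmin, hdiv, hmod]
        have : R - R = 0 := by omega
        rw [this, pvG]
        simp

-- single-character str.count is an element count
theorem pvGoSingle (c : Char) : ∀ (fuel : Nat) (s : List Char) (acc : Nat), s.length ≤ fuel →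
    PySem.Chars.count.go [c] fuel s acc = acc + s.count c := by
  intro fuel
  induction fuel with
  | zero =>
    intro s acc h
    have : s = [] := List.length_eq_zero_iff.mp (by omega)
    subst this
    rw [PySem.Chars.count.go.eq_def]
    simp
  | succ fuel ih =>
    intro s acc h
    match s with
    | [] => rw [PySem.Chars.count.go.eq_def]; simp
    | x :: t =>
      rw [PySem.Chars.count.go.eq_def]
      simp only [List.length_cons] at h
      by_cases hx : x = c
      · subst hx
        simp only [List.isPrefixOf, beq_self_eq_true, Bool.true_and,
          if_true, List.length_singleton, List.drop_one, List.tail_cons]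
        rw [ih t (acc + 1) (by omega)]
        simp
        omega
      · have hpre : List.isPrefixOf [c] (x :: t) = false := by
          simp [List.isPrefixOf]
          intro hcx; exact hx hcx.symm
        simp only [hpre, Bool.false_eq_true, if_false]
        rw [ih t acc (by omega)]
        simp [hx]

theorem pvCountSingle (s : List Char) (c : Char) : PySem.Chars.count s [c] = s.count c := by
  unfold PySem.Chars.count
  simpa using pvGoSingle c s.length s 0 le_rfl

-- ===== VERDICT (by name: the statement is the Claim_ definition above) =====
theorem calculateA_spec : Claim_equal_calculateA := by
  intro var n _ hpre
  simp only [Spec_calculateA, calculateA, calculateA_alt]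
  by_cases hn : n ≤ 0
  · rw [if_pos hn, pvWhileA, if_neg (by omega)]
    simp
  · rw [if_neg hn]
    have hvar : var ≠ "" := by
      rcases hpre with h | h
      · omega
      · exact h
    set v := (PySem.Str.lower var).toList with hvdef
    have hv : v ≠ [] := by
      simp only [hvdef, PySem.Str.toList_lower]
      simp [PySem.Chars.lower]
      intro h
      exact hvar (by cases var; simp_all)
    have hN : n = ((n.toNat : Nat) : Int) := by omega
    set N := n.toNat with hNdef
    have hN1 : 1 ≤ N := by omega
    rw [hN]
    have hw := pvWhileA_spec v N hv (N + 1) [] (by simp) (by simp)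
    simp only [List.length_nil, Nat.cast_zero, Nat.sub_zero, List.nil_append] at hw
    rw [hw]
    rw [PySem.List.foldl_beq_add_one, pvG_count v hv 'a' N]
    have hla : ("a" : String).toList = ['a'] := by simp
    simp only [PySem.Str.count_eq, PySem.Str.len_eq, PySem.Str.toList_slice,
      PySem.Chars.slice_eq_listSlice, hla, pvCountSingle, ← hvdef]
    rw [PySem.Int.floordiv_natCast, PySem.Int.mod_natCast, PySem.List.slice_to_natCast]
    push_cast
    ring
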